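-- pv_equiv track=rewrite | github.com/HyojungKim2022/Final-project | BLC/views/make_prediction.py | calculate_price
-- ===== SOURCE A (Python) =====
-- def calculate_price(res_dict, price_dict):
--     total_amount = 0
--     each_amount = {}
--     for item in res_dict:
--         name, _ = list(item.items())[0]
--         price = price_dict.get(name, 0)
--         total_amount += price
--
--         if name not in each_amount:
--             each_amount[name] = [each_amount.get(name, 0) + price, 1]
--         else:
--             each_amount[name][1] += 1
--             each_amount[name][0] += price
--     return total_amount, each_amount
-- ===== SOURCE B (Python) =====
-- def calculate_price(res_dict, price_dict):
--     # count occurrences of each name (first-appearance order), then multiply once per name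
--     counts = {}
--     for item in res_dict:
--         name = next(iter(item))
--         counts[name] = counts.get(name, 0) + 1
--     total_amount = 0
--     each_amount = {}
--     for name, count in counts.items():
--         price = price_dict.get(name, 0)
--         each_amount[name] = [price * count, count]
--         total_amount += price * count
--     return total_amount, each_amount
-- ===== Notes on version B (the rewrite author's own statement) =====
-- stated objective: alternative
-- what changed: Replaces A's per-occurrence accumulation (branching on whether the name is already in each_amount and mutating its [amount, count] cell) by a two-phase count-then-multiply: one pass builds a name->count table, a second pass over the distinct names computes [price*count, count] and sums price*count into the total.
import Mathlib
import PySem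

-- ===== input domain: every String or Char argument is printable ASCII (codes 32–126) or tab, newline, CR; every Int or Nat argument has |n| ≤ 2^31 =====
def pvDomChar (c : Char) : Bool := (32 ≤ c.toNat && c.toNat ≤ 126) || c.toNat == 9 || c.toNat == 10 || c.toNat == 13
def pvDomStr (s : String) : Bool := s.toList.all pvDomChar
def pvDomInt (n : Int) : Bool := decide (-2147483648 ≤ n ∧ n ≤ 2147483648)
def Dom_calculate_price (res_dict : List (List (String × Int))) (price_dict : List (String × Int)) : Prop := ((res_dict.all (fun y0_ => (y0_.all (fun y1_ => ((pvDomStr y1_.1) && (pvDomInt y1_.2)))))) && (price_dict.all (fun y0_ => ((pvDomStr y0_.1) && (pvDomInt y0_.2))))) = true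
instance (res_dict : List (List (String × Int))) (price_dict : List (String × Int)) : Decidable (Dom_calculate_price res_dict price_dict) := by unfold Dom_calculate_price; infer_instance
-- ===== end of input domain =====

-- B groups by name first (count table), then multiplies price*count once per distinct name,
-- instead of A's per-occurrence accumulation; same cost, different decomposition ("alternative").

-- ===== PORT A =====
-- each_amount[name][1] += 1; each_amount[name][0] += price  (value cells are always 2-lists)
def pvBump (price : Int) (v : List Int) : List Int :=
  match v with
  | [a, c] => [a + price, c + 1]
  | v => v

def calculate_price (res_dict : List (List (String × Int))) (price_dict : List (String × Int)) : Int × (List (String × List Int)) :=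
  let pd : PySem.Dict String Int := PySem.Dict.mk price_dict
  let st :=
    res_dict.foldl (fun st item =>
      match item with
      | [] => st   -- Python raises IndexError here (list(item.items())[0]); excluded by Pre_
      | (name, _) :: _ =>
        let price := pd.getD name 0
        let total := st.1 + price
        if st.2.contains name then
          (total, st.2.modify name [] (pvBump price))
        else
          -- each_amount.get(name, 0) is 0 in this branch (name not present)
          (total, st.2.insert name [0 + price, 1]))
      ((0 : Int), (PySem.Dict.empty : PySem.Dict String (List Int)))
  (st.1, st.2.items)

-- ===== PORT B =====
def calculate_price_alt (res_dict : List (List (String × Int))) (price_dict : List (String × Int)) : Int × (List (String × List Int)) :=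
  let counts : PySem.Dict String Int :=
    res_dict.foldl (fun d item =>
      match item with
      | [] => d   -- Python raises StopIteration here (next(iter(item))); excluded by Pre_
      | (name, _) :: _ => d.insert name (d.getD name 0 + 1)) PySem.Dict.empty
  let pd : PySem.Dict String Int := PySem.Dict.mk price_dict
  let st :=
    counts.items.foldl (fun st kc =>
      let price := pd.getD kc.1 0
      (st.1 + price * kc.2, st.2.insert kc.1 [price * kc.2, kc.2]))
      ((0 : Int), (PySem.Dict.empty : PySem.Dict String (List Int)))
  (st.1, st.2.items)

-- ===== PRECONDITION & SPEC =====
-- Pre_ excludes res_dict containing an empty inner dict: there Python A raises IndexError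
-- (and B raises StopIteration).
def Pre_calculate_price (res_dict : List (List (String × Int))) (price_dict : List (String × Int)) : Prop :=
  ∀ item ∈ res_dict, item ≠ []
instance (res_dict : List (List (String × Int))) (price_dict : List (String × Int)) : Decidable (Pre_calculate_price res_dict price_dict) := by unfold Pre_calculate_price; infer_instance
def pvWitness_calculate_price : (List (List (String × Int))) × (List (String × Int)) :=
  ([[("a", 1)], [("b", 2)], [("a", 3)]], [("a", 5), ("c", 7)])

def Spec_calculate_price (res_dict : List (List (String × Int))) (price_dict : List (String × Int)) (out : Int × (List (String × List Int))) : Prop := out = calculate_price_alt res_dict price_dict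
instance (res_dict : List (List (String × Int))) (price_dict : List (String × Int)) (out : Int × (List (String × List Int))) : Decidable (Spec_calculate_price res_dict price_dict out) := by unfold Spec_calculate_price; infer_instance

-- ===== CLAIM (what is proved, stated in full; the proofs are below) =====
def Claim_equal_calculate_price : Prop := ∀ (res_dict : List (List (String × Int))) (price_dict : List (String × Int)), Dom_calculate_price res_dict price_dict → Pre_calculate_price res_dict price_dict → Spec_calculate_price res_dict price_dict (calculate_price res_dict price_dict)

-- ===== LEMMAS AND PROOFS =====

-- the list of first keys of the (nonempty) items, in order
def pvNames (res_dict : List (List (String × Int))) : List String :=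
  res_dict.filterMap (fun item => item.head?.map Prod.fst)

-- A's loop step, on a name
def pvStepA (pd : PySem.Dict String Int) (st : Int × PySem.Dict String (List Int)) (name : String) : Int × PySem.Dict String (List Int) :=
  if st.2.contains name then
    (st.1 + pd.getD name 0, st.2.modify name [] (pvBump (pd.getD name 0)))
  else
    (st.1 + pd.getD name 0, st.2.insert name [0 + pd.getD name 0, 1])

-- the occurrence count, as an Int
def pvCnt (ns : List String) (k : String) : Int := (ns.count k : Int)

-- one row of the result table, and the whole table / total over the distinct names
def pvRow (pd : PySem.Dict String Int) (ns : List String) (k : String) : String × List Int :=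
  (k, [pd.getD k 0 * pvCnt ns k, pvCnt ns k])

def pvTab (pd : PySem.Dict String Int) (ns : List String) : List (String × List Int) :=
  (PySem.Set.ofList ns).map (pvRow pd ns)

def pvTot (pd : PySem.Dict String Int) (ns : List String) : Int :=
  ((PySem.Set.ofList ns).map (fun k => pd.getD k 0 * pvCnt ns k)).sum

lemma pvA_names (pd : PySem.Dict String Int) (res_dict : List (List (String × Int)))
    (st : Int × PySem.Dict String (List Int)) :
    res_dict.foldl (fun st item =>
      match item with
      | [] => st
      | (name, _) :: _ =>
        let price := pd.getD name 0
        let total := st.1 + price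
        if st.2.contains name then
          (total, st.2.modify name [] (pvBump price))
        else
          (total, st.2.insert name [0 + price, 1])) st
    = (pvNames res_dict).foldl (pvStepA pd) st := by
  induction res_dict generalizing st with
  | nil => rfl
  | cons item rest ih =>
    cases item with
    | nil => simpa [pvNames] using ih st
    | cons h t => simpa [pvNames, pvStepA] using ih _

lemma pvB_names (res_dict : List (List (String × Int))) (d : PySem.Dict String Int) :
    res_dict.foldl (fun d item =>
      match item with
      | [] => d
      | (name, _) :: _ => d.insert name (d.getD name 0 + 1)) d
    = (pvNames res_dict).foldl (fun d n => d.insert n (d.getD n 0 + 1)) d := by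
  induction res_dict generalizing d with
  | nil => rfl
  | cons item rest ih =>
    cases item with
    | nil => simpa [pvNames] using ih d
    | cons h t => simpa [pvNames] using ih _

-- a pair-fold whose components update independently splits
lemma pvFoldPairSplit {α β γ : Type} (l : List α) (f : β → α → β) (g : γ → α → γ) (a : β) (b : γ) :
    l.foldl (fun st x => (f st.1 x, g st.2 x)) (a, b) = (l.foldl f a, l.foldl g b) := by
  induction l generalizing a b with
  | nil => rfl
  | cons x t ih => simpa using ih (f a x) (g b x)

lemma pvFoldAdd {α : Type} (l : List α) (f : α → Int) (a : Int) :
    l.foldl (fun t x => t + f x) a = a + (l.map f).sum := by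
  induction l generalizing a with
  | nil => simp
  | cons x t ih => simp [ih]; ring

-- bumping a summand at one element of a Nodup list
lemma pvSumBump (S : List String) (f : String → Int) (d : Int) (n : String)
    (hnd : S.Nodup) (hmem : n ∈ S) :
    (S.map (fun k => f k + if k = n then d else 0)).sum = (S.map f).sum + d := by
  induction S with
  | nil => cases hmem
  | cons x t ih =>
    rcases List.mem_cons.mp hmem with rfl | hm
    · have hnx : ∀ k ∈ t, (f k + if k = n then d else 0) = f k := by
        intro k hk
        have : k ≠ n := fun h => (List.nodup_cons.mp hnd).1 (h ▸ hk)
        simp [this]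
      simp [List.map_congr_left hnx]; ring
    · have hxn : x ≠ n := fun h => (List.nodup_cons.mp hnd).1 (h ▸ hm)
      have := ih (List.nodup_cons.mp hnd).2 hm
      simp [hxn, this]; ring

lemma pvModifyInsert (d : PySem.Dict String (List Int)) (k : String) (f : List Int → List Int) :
    d.modify k [] f = d.insert k (f (d.getD k [])) := rfl

lemma pvKeysMapFst {ν : Type} (S : List String) (g : String → ν) :
    ((S.map (fun k => (k, g k))).map Prod.fst) = S := by
  induction S with
  | nil => rfl
  | cons x t ih => simp [ih]

lemma pvStepA_pos (pd : PySem.Dict String Int) (t : Int) (e : PySem.Dict String (List Int))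
    (name : String) (h : e.contains name = true) :
    pvStepA pd (t, e) name = (t + pd.getD name 0, e.modify name [] (pvBump (pd.getD name 0))) := by
  unfold pvStepA; simp [h]

lemma pvStepA_neg (pd : PySem.Dict String Int) (t : Int) (e : PySem.Dict String (List Int))
    (name : String) (h : e.contains name = false) :
    pvStepA pd (t, e) name = (t + pd.getD name 0, e.insert name [0 + pd.getD name 0, 1]) := by
  unfold pvStepA; simp [h]

lemma pvCnt_append (ns : List String) (n k : String) :
    pvCnt (ns ++ [n]) k = pvCnt ns k + (if k = n then 1 else 0) := by
  unfold pvCnt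
  rw [List.count_append, List.count_singleton]
  by_cases h : k = n
  · subst h; simp
  · have hb : (n == k) = false := by simp [Ne.symm h]
    simp [hb, h]

lemma pvTabKeys (pd : PySem.Dict String Int) (ns : List String) :
    (PySem.Dict.mk (pvTab pd ns)).keys = PySem.Set.ofList ns := by
  simp only [pvTab, PySem.Dict.keys_mk, List.map_map]
  induction PySem.Set.ofList ns with
  | nil => rfl
  | cons x t ih => simp [ih, pvRow]

lemma pvTot_append_mem (pd : PySem.Dict String Int) (ns : List String) (n : String) (h : n ∈ ns) :
    pvTot pd (ns ++ [n]) = pvTot pd ns + pd.getD n 0 := by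
  unfold pvTot
  rw [PySem.Set.ofList_append_singleton, PySem.Set.add_of_mem ((PySem.Set.mem_ofList ns n).mpr h)]
  have hcongr : ∀ k ∈ PySem.Set.ofList ns,
      pd.getD k 0 * pvCnt (ns ++ [n]) k
      = (fun k => pd.getD k 0 * pvCnt ns k) k + (if k = n then pd.getD n 0 else 0) := by
    intro k _
    rw [pvCnt_append]
    by_cases hkn : k = n
    · subst hkn; simp [mul_add]
    · simp [hkn]
  rw [List.map_congr_left hcongr,
      pvSumBump (PySem.Set.ofList ns) (fun k => pd.getD k 0 * pvCnt ns k) (pd.getD n 0) n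
        (PySem.Set.nodup_ofList ns) ((PySem.Set.mem_ofList ns n).mpr h)]

lemma pvTot_append_notmem (pd : PySem.Dict String Int) (ns : List String) (n : String) (h : n ∉ ns) :
    pvTot pd (ns ++ [n]) = pvTot pd ns + (0 + pd.getD n 0) := by
  unfold pvTot
  rw [PySem.Set.ofList_append_singleton,
      PySem.Set.add_of_not_mem (fun hm => h ((PySem.Set.mem_ofList ns n).mp hm)),
      List.map_append, List.sum_append]
  have hcongr : ∀ k ∈ PySem.Set.ofList ns,
      pd.getD k 0 * pvCnt (ns ++ [n]) k = (fun k => pd.getD k 0 * pvCnt ns k) k := by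
    intro k hk
    have hkn : k ≠ n := fun hh => h (hh ▸ (PySem.Set.mem_ofList ns k).mp hk)
    rw [pvCnt_append]; simp [hkn]
  rw [List.map_congr_left hcongr]
  have hc1 : pvCnt (ns ++ [n]) n = 1 := by
    rw [pvCnt_append]
    simp [pvCnt, List.count_eq_zero.mpr h]
  simp [hc1]

lemma pvA_closed (pd : PySem.Dict String Int) (ns : List String) :
    ns.foldl (pvStepA pd) ((0 : Int), (PySem.Dict.empty : PySem.Dict String (List Int)))
    = (pvTot pd ns, PySem.Dict.mk (pvTab pd ns)) := by
  induction ns using List.reverseRecOn with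
  | nil => rfl
  | append_singleton ns n ih =>
    rw [List.foldl_append, ih, List.foldl_cons, List.foldl_nil]
    by_cases h : n ∈ ns
    · have hmemS : n ∈ PySem.Set.ofList ns := (PySem.Set.mem_ofList ns n).mpr h
      have hcont : (PySem.Dict.mk (pvTab pd ns)).contains n = true :=
        (PySem.Dict.contains_iff_mem_keys _ n).mpr (by rw [pvTabKeys]; exact hmemS)
      have hndk : (PySem.Dict.mk (pvTab pd ns)).keys.Nodup := by
        rw [pvTabKeys]; exact PySem.Set.nodup_ofList ns
      have hmi : (n, [pd.getD n 0 * pvCnt ns n, pvCnt ns n]) ∈ (PySem.Dict.mk (pvTab pd ns)).items :=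
        List.mem_map_of_mem (f := pvRow pd ns) hmemS
      have hget : (PySem.Dict.mk (pvTab pd ns)).getD n [] = [pd.getD n 0 * pvCnt ns n, pvCnt ns n] :=
        PySem.Dict.getD_of_mem_items _ hmi hndk []
      rw [pvStepA_pos pd _ _ n hcont, pvModifyInsert, hget]
      simp only [pvBump, Prod.mk.injEq]
      constructor
      · rw [pvTot_append_mem pd ns n h]
      · apply PySem.Dict.ext
        rw [PySem.Dict.items_insert_of_contains _ _ hcont]
        show List.map _ ((PySem.Set.ofList ns).map (pvRow pd ns)) = pvTab pd (ns ++ [n])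
        rw [List.map_map]
        unfold pvTab
        rw [PySem.Set.ofList_append_singleton, PySem.Set.add_of_mem hmemS]
        apply List.map_congr_left
        intro k hk
        by_cases hkn : k = n
        · subst hkn
          simp [pvRow, pvCnt_append, mul_add]
        · have hb : (k == n) = false := by simp [hkn]
          simp [pvRow, Function.comp, hb, pvCnt_append, hkn]
    · have hmemS : n ∉ PySem.Set.ofList ns := fun hm => h ((PySem.Set.mem_ofList ns n).mp hm)
      have hcont : (PySem.Dict.mk (pvTab pd ns)).contains n = false := by
        rw [Bool.eq_false_iff]
        intro hc'
        exact hmemS (by rw [← pvTabKeys pd ns]; exact (PySem.Dict.contains_iff_mem_keys _ n).mp hc')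
      rw [pvStepA_neg pd _ _ n hcont]
      simp only [Prod.mk.injEq]
      constructor
      · rw [pvTot_append_notmem pd ns n h]; ring
      · apply PySem.Dict.ext
        rw [PySem.Dict.items_insert_of_not_contains _ _ hcont]
        show (PySem.Set.ofList ns).map (pvRow pd ns) ++ [(n, [0 + pd.getD n 0, 1])] = pvTab pd (ns ++ [n])
        unfold pvTab
        rw [PySem.Set.ofList_append_singleton, PySem.Set.add_of_not_mem hmemS, List.map_append]
        congr 1
        · apply List.map_congr_left
          intro k hk
          have hkn : k ≠ n := fun hh => hmemS (hh ▸ hk)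
          simp [pvRow, pvCnt_append, hkn]
        · have hc1 : pvCnt (ns ++ [n]) n = 1 := by
            rw [pvCnt_append]
            simp [pvCnt, List.count_eq_zero.mpr h]
          simp [pvRow, hc1]

-- ===== VERDICT (by name: the statement is the Claim_ definition above) =====
theorem calculate_price_spec : Claim_equal_calculate_price := by
  intro res_dict price_dict _hdom _hpre
  unfold Spec_calculate_price calculate_price calculate_price_alt
  dsimp only
  rw [pvA_names, pvB_names, PySem.Dict.foldl_insert_getD_add_one_eq_counter,
      PySem.Dict.items_counter]
  set pd : PySem.Dict String Int := PySem.Dict.mk price_dict with hpd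
  set ns := pvNames res_dict with hns
  set L := (PySem.Set.ofList ns).map (fun k => (k, (ns.count k : Int))) with hL
  rw [pvFoldPairSplit L (fun t kc => t + pd.getD kc.1 0 * kc.2)
        (fun e kc => e.insert kc.1 [pd.getD kc.1 0 * kc.2, kc.2]) 0 PySem.Dict.empty]
  rw [pvA_closed pd ns]
  have hfresh : ∀ a ∈ L, (PySem.Dict.empty : PySem.Dict String (List Int)).contains a.1 = false := by
    intro a _; simp [PySem.Dict.contains_empty]
  have hnodup : (L.map Prod.fst).Nodup := by
    rw [hL, pvKeysMapFst]; exact PySem.Set.nodup_ofList ns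
  rw [PySem.Dict.items_foldl_insert_fresh L Prod.fst
        (fun kc => [pd.getD kc.1 0 * kc.2, kc.2]) PySem.Dict.empty hfresh hnodup,
      pvFoldAdd]
  simp only [Prod.mk.injEq]
  constructor
  · rw [hL, List.map_map, zero_add]
    unfold pvTot pvCnt
    exact congrArg List.sum (List.map_congr_left (fun k _ => rfl))
  · show pvTab pd ns = _
    rw [hL, List.map_map]
    unfold pvTab pvRow pvCnt
    simp [PySem.Dict.empty, Function.comp]
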